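-- pv_equiv track=rewrite | github.com/walk4rever/pi-matrix | cloud/message/main.py | _extract_cmd
-- ===== SOURCE A (Python) =====
-- _COMMANDS = {"/reset", "/new", "/compact", "/help", "/status"}
--
-- def _extract_cmd(text: str) -> str | None:
--     if not text:
--         return None
--     t = text.strip().lower()
--     for cmd in _COMMANDS:
--         if t == cmd or t.startswith(cmd + " "):
--             return cmd
--     return None
-- ===== SOURCE B (Python) =====
-- _COMMANDS = {"/reset", "/new", "/compact", "/help", "/status"}
--
-- def _extract_cmd(text: str) -> str | None:
--     t = text.strip().lower()
--     first = t.partition(" ")[0]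
--     return first if first in _COMMANDS else None
-- ===== Notes on version B (the rewrite author's own statement) =====
-- stated objective: idiomatic
-- what changed: B replaces the per-command prefix-matching loop by extracting the first token (the prefix before the first single-space separator, via str.partition) and doing one set membership test; the explicit empty-text guard also disappears since the empty token is never a command.
import Mathlib
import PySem

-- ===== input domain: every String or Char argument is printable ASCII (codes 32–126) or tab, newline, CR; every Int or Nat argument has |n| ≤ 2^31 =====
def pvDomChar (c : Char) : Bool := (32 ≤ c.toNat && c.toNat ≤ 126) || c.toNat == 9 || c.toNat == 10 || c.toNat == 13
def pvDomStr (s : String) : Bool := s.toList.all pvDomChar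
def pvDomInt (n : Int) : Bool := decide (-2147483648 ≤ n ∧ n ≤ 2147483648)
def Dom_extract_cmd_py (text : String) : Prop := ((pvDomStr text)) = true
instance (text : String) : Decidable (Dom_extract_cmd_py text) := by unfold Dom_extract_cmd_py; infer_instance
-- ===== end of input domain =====

-- B replaces A's per-command prefix loop by first-token extraction plus one membership test (idiomatic decomposition, same cost).

-- _COMMANDS: a Python set of five distinct string literals; ported as the literal list of its distinct elements.
def pyCommands : List String := ["/reset", "/new", "/compact", "/help", "/status"]

-- ===== PORT A =====
-- the for-loop with early return over the set becomes findSome? over the elements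
-- (the Python iteration order of the set is irrelevant: at most one command can match a given t).
def extract_cmd_py (text : String) : Option String :=
  if text == "" then none
  else
    let t := PySem.Str.lower (PySem.Str.strip text)
    pyCommands.findSome? (fun cmd =>
      if t == cmd || PySem.Str.startswith t (cmd ++ " ") then some cmd else none)

-- ===== PORT B =====
-- t.partition(" ")[0] is the prefix of t before the first ' ' (exact: partition splits at the
-- first occurrence of the one-character separator), i.e. takeWhile (· ≠ ' ').
def extract_cmd_py_alt (text : String) : Option String :=
  let t := PySem.Str.lower (PySem.Str.strip text)
  let first := String.ofList (t.toList.takeWhile (fun c => c ≠ ' '))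
  if pyCommands.contains first then some first else none

-- ===== PRECONDITION & SPEC =====
def Spec_extract_cmd_py (text : String) (out : Option String) : Prop := out = extract_cmd_py_alt text
instance (text : String) (out : Option String) : Decidable (Spec_extract_cmd_py text out) := by unfold Spec_extract_cmd_py; infer_instance

-- ===== CLAIM (what is proved, stated in full; the proofs are below) =====
def Claim_equal_extract_cmd_py : Prop := ∀ (text : String), Dom_extract_cmd_py text → Spec_extract_cmd_py text (extract_cmd_py text)

-- ===== LEMMAS AND PROOFS =====

-- takeWhile (≠ ' ') picks out w exactly when l is w, or w followed by a space.
theorem takeWhile_eq_iff (w l : List Char) (hw : ∀ c ∈ w, c ≠ ' ') :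
    l.takeWhile (fun c => decide (c ≠ ' ')) = w ↔ (l = w ∨ (w ++ [' ']) <+: l) := by
  induction w generalizing l with
  | nil =>
    cases l with
    | nil => simp
    | cons c l' =>
      by_cases hc : c = ' '
      · subst hc; simp [List.prefix_cons_iff]
      · simp [hc, List.cons_prefix_cons]
        intro h; exact hc h.symm
  | cons a w' ih =>
    have ha : a ≠ ' ' := hw a (by simp)
    cases l with
    | nil => simp
    | cons c l' =>
      rw [List.takeWhile_cons]
      by_cases hc : c = ' '
      · subst hc
        simp only [ne_eq, not_true_eq_false, decide_false, Bool.false_eq_true, if_false,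
          List.cons_append, List.cons_prefix_cons]
        constructor
        · intro h; exact absurd h.symm (List.cons_ne_nil a w')
        · rintro ((⟨⟩ : (' '::l' = a::w')) | h)
          · exact absurd rfl ha
          · exact absurd h.1 ha
      · simp only [ne_eq, hc, not_false_eq_true, decide_true, if_true, List.cons_append,
          List.cons_prefix_cons, List.cons.injEq]
        rw [ih l' (fun x hx => hw x (by simp [hx]))]
        constructor
        · rintro ⟨rfl, h2 | h2⟩
          · exact Or.inl ⟨rfl, h2⟩
          · exact Or.inr ⟨rfl, h2⟩
        · rintro (⟨rfl, rfl⟩ | ⟨rfl, h2⟩)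
          · exact ⟨rfl, Or.inl rfl⟩
          · exact ⟨rfl, Or.inr h2⟩

-- the loop condition on cmd holds iff the first token of t is exactly cmd (cmd has no space)
theorem cond_iff (t cmd : String) (hw : ∀ c ∈ cmd.toList, c ≠ ' ') :
    (t == cmd || PySem.Str.startswith t (cmd ++ " ")) = true ↔
      String.ofList (t.toList.takeWhile (fun c => c ≠ ' ')) = cmd := by
  have hmk : String.ofList (t.toList.takeWhile (fun c => c ≠ ' ')) = cmd ↔
      t.toList.takeWhile (fun c => decide (c ≠ ' ')) = cmd.toList := by
    constructor
    · intro h; have := congrArg String.toList h; simpa using this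
    · intro h; apply String.toList_inj.mp; simpa using h
  rw [hmk, takeWhile_eq_iff cmd.toList t.toList hw]
  simp only [Bool.or_eq_true, beq_iff_eq, PySem.Str.startswith_eq]
  rw [PySem.Chars.startswith_iff]
  constructor
  · rintro (rfl | h)
    · exact Or.inl rfl
    · right; simpa using h
  · rintro (h | h)
    · left; exact String.toList_inj.mp h
    · right; simpa using h

-- the whole loop over any command list without spaces equals the token-lookup form
theorem loop_eq (t : String) (cmds : List String) (h : ∀ cmd ∈ cmds, ∀ c ∈ cmd.toList, c ≠ ' ') :
    cmds.findSome? (fun cmd =>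
      if t == cmd || PySem.Str.startswith t (cmd ++ " ") then some cmd else none)
    = (if cmds.contains (String.ofList (t.toList.takeWhile (fun c => c ≠ ' ')))
       then some (String.ofList (t.toList.takeWhile (fun c => c ≠ ' '))) else none) := by
  induction cmds with
  | nil => simp
  | cons c rest ih =>
    have hc := cond_iff t c (h c (by simp))
    rw [List.findSome?_cons]
    by_cases hf : String.ofList (t.toList.takeWhile (fun x => decide (x ≠ ' '))) = c
    · rw [if_pos (hc.mpr hf)]
      simp only [ne_eq, decide_not] at hf
      simp [hf]
    · have hcond : (t == c || PySem.Str.startswith t (c ++ " ")) = false := by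
        cases hb : (t == c || PySem.Str.startswith t (c ++ " ")) with
        | false => rfl
        | true => exact absurd (hc.mp hb) hf
      rw [hcond]
      simp only [List.contains_cons]
      have hne : (String.ofList (t.toList.takeWhile (fun x => decide (x ≠ ' '))) == c) = false := by
        simpa using hf
      rw [hne, Bool.false_or]
      exact ih (fun cmd hm => h cmd (by simp [hm]))

-- ===== VERDICT (by name: the statement is the Claim_ definition above) =====
theorem extract_cmd_py_spec : Claim_equal_extract_cmd_py := by
  intro text _
  unfold Spec_extract_cmd_py extract_cmd_py extract_cmd_py_alt
  by_cases he : text = ""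
  · subst he
    have h1 : PySem.Str.strip "" = "" := by decide
    have h2 : PySem.Str.lower "" = "" := by decide
    simp [h1, h2, pyCommands]
  · rw [if_neg (by simpa using he)]
    exact loop_eq _ pyCommands (by simp [pyCommands])
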